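-- pv_equiv track=rewrite | github.com/venico19/leetcode | others/pick_drop_permutation.py | trip2
-- ===== SOURCE A (Python) =====
-- def trip2(l, capacity):
--     N = len(l)
--     res = []
--
--     def backtracking(available_pick, available_drop, count, prev_path):
--         if len(prev_path) == 2*N:
--             res.append(prev_path)
--             return
--         for i in range(N):
--             if available_drop[i] == 1:
--                 available_drop[i] = 0
--                 backtracking(available_pick, available_drop, count - 1, prev_path + [l[i][1]])
--                 available_drop[i] = 1
--
--         if count < capacity:
--             for i in range(N):
--                 if available_pick[i] == 1:
--                     available_pick[i] = 0
--                     available_drop[i] = 1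
--                     backtracking(available_pick, available_drop, count + 1, prev_path + [l[i][0]])
--                     available_drop[i] = 0
--                     available_pick[i] = 1
--
--     available_pick = [1 for _ in range(N)]
--     available_drop = [0 for _ in range(N)]
--     backtracking(available_pick, available_drop, 0, [])
--     return res
-- ===== SOURCE B (Python) =====
-- def trip2(l, capacity):
--     N = len(l)
--     res = []
--     # iterative DFS: explicit stack of (count, pickable indices asc, droppable indices asc, path)
--     stack = [(0, list(range(N)), [], [])]
--     while stack:
--         count, picks, drops, path = stack.pop()
--         if len(path) == 2 * N:
--             res.append(path)
--             continue
--         succ = [(count - 1, picks, [j for j in drops if j != i], path + [l[i][1]])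
--                 for i in drops]
--         if count < capacity:
--             succ += [(count + 1, [j for j in picks if j != i],
--                       [j for j in drops if j < i] + [i] + [j for j in drops if j > i],
--                       path + [l[i][0]])
--                      for i in picks]
--         stack.extend(reversed(succ))
--     return res
-- ===== Notes on version B (the rewrite author's own statement) =====
-- stated objective: alternative
-- what changed: A's recursive backtracking over shared, mutated-and-restored 0/1 flag arrays is replaced by an iterative DFS with an explicit stack of immutable (count, pickable-indices, droppable-indices, path) states, pushing each state's successors in reverse so the LIFO pop order reproduces A's drop-first, index-ascending output order exactly.
import Mathlib
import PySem

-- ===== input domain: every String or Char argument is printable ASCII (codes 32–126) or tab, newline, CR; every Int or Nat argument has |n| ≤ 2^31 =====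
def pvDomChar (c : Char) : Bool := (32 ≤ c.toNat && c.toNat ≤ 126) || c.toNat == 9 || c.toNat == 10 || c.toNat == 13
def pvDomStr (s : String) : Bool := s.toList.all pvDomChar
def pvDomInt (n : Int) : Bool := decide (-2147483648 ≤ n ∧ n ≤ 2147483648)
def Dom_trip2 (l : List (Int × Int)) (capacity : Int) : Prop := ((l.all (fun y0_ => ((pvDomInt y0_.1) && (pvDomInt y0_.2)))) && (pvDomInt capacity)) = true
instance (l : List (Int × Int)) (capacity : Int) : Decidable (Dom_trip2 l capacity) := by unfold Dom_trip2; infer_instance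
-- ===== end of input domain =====

-- B replaces A's recursive backtracking over 0/1 flag arrays by an iterative DFS with an
-- explicit stack of (count, pickable-indices, droppable-indices, path) states (objective:
-- alternative decomposition, same output list in the same order).

-- ===== PORT A =====
-- termination helpers for the recursive backtracking (cited in decreasing_by)
theorem pvCountSetZeroLt (xs : List Int) (i : Nat) (h : xs.getD i 0 = 1) :
    (xs.set i 0).count 1 < xs.count 1 := by
  induction xs generalizing i with
  | nil => simp [List.getD] at h
  | cons a t ih =>
    cases i with
    | zero =>
      simp [List.getD] at h
      subst h
      simp
    | succ j =>
      simp [List.getD] at h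
      have := ih j (by simpa [List.getD] using h)
      simp [List.count_cons]
      omega

theorem pvCountSetLe (xs : List Int) (i : Nat) (v : Int) :
    (xs.set i v).count 1 ≤ xs.count 1 + 1 := by
  induction xs generalizing i with
  | nil => simp
  | cons a t ih =>
    cases i with
    | zero => simp [List.count_cons]; split <;> split <;> omega
    | succ j =>
      have := ih j
      simp [List.count_cons]
      split <;> omega

-- literal port of A's `backtracking` (the mutated/restored flag lists become `set` copies,
-- the shared `res` accumulator becomes the returned list)
def pvBt (l : List (Int × Int)) (capacity : Int) (ap ad : List Int) (count : Int)
    (path : List Int) : List (List Int) :=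
  if path.length = 2 * l.length then [path]
  else
    let res1 := (List.range l.length).foldl (fun acc i =>
      if ad.getD i 0 = 1 then
        acc ++ pvBt l capacity ap (ad.set i 0) (count - 1) (path ++ [(l.getD i (0,0)).2])
      else acc) []
    if count < capacity then
      res1 ++ (List.range l.length).foldl (fun acc i =>
        if ap.getD i 0 = 1 then
          acc ++ pvBt l capacity (ap.set i 0) (ad.set i 1) (count + 1) (path ++ [(l.getD i (0,0)).1])
        else acc) []
    else res1
termination_by 2 * ap.count 1 + ad.count 1
decreasing_by
  · exact Nat.add_lt_add_left (pvCountSetZeroLt ad i (by assumption)) _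
  · have h1 := pvCountSetZeroLt ap i (by assumption)
    have h2 := pvCountSetLe ad i 1
    omega

def trip2 (l : List (Int × Int)) (capacity : Int) : List (List Int) :=
  pvBt l capacity (List.replicate l.length 1) (List.replicate l.length 0) 0 []

-- ===== PORT B =====
-- successors of one DFS state, in the order Source B builds `succ`: drop moves then pick moves
def pvSuccs (l : List (Int × Int)) (capacity count : Int) (picks drops : List Nat)
    (path : List Int) : List (Int × List Nat × List Nat × List Int) :=
  drops.map (fun i => (count - 1, picks, drops.filter (fun j => j ≠ i), path ++ [(l.getD i (0,0)).2]))
  ++ (if count < capacity then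
        picks.map (fun i => (count + 1, picks.filter (fun j => j ≠ i),
          drops.filter (fun j => j < i) ++ [i] ++ drops.filter (fun j => i < j),
          path ++ [(l.getD i (0,0)).1]))
      else [])

def pvMeasB (s : Int × List Nat × List Nat × List Int) : Nat :=
  2 * s.2.1.length + s.2.2.1.length

theorem pvLenSplitLe (xs : List Nat) (i : Nat) :
    (xs.filter (fun j => j < i)).length + (xs.filter (fun j => i < j)).length ≤ xs.length := by
  induction xs with
  | nil => simp
  | cons a t ih =>
    by_cases h1 : a < i <;> by_cases h2 : i < a <;>
      simp [h1, h2] <;> omega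

theorem pvLenFilterNeLt {xs : List Nat} {i : Nat} (h : i ∈ xs) :
    (xs.filter (fun j => j ≠ i)).length < xs.length :=
  List.length_filter_lt_length_iff_exists.2 ⟨i, h, by simp⟩

theorem pvMeasBSucc {l : List (Int × Int)} {capacity count : Int} {picks drops : List Nat}
    {path : List Int} {t : Int × List Nat × List Nat × List Int}
    (ht : t ∈ pvSuccs l capacity count picks drops path) :
    pvMeasB t < 2 * picks.length + drops.length := by
  rcases List.mem_append.1 ht with h | h
  · rcases List.mem_map.1 h with ⟨i, hi, rfl⟩
    have := pvLenFilterNeLt hi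
    simp only [pvMeasB]
    omega
  · by_cases hc : count < capacity
    · simp only [if_pos hc] at h
      rcases List.mem_map.1 h with ⟨i, hi, rfl⟩
      have h1 := pvLenFilterNeLt hi
      have h2 := pvLenSplitLe drops i
      simp only [pvMeasB, List.length_append, List.length_cons, List.length_nil]
      omega
    · simp [if_neg hc] at h

theorem pvSumFacLt (m : Nat) (ss : List (Int × List Nat × List Nat × List Int))
    (hmem : ∀ t ∈ ss, pvMeasB t < m) (hlen : ss.length ≤ m) :
    (ss.map (fun s => (pvMeasB s + 1).factorial)).sum < (m + 1).factorial := by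
  have hsum : (ss.map (fun s => (pvMeasB s + 1).factorial)).sum ≤ ss.length * m.factorial := by
    induction ss with
    | nil => simp
    | cons a t ih =>
      have ha : (pvMeasB a + 1).factorial ≤ m.factorial :=
        Nat.factorial_le (by have := hmem a (by simp); omega)
      have := ih (fun t' ht' => hmem t' (by simp [ht'])) (by simp at hlen ⊢; omega)
      simp [Nat.succ_mul]
      omega
  have h1 : ss.length * m.factorial ≤ m * m.factorial :=
    Nat.mul_le_mul_right _ hlen
  have h2 : m * m.factorial < (m + 1) * m.factorial := by
    have := Nat.factorial_pos m
    exact Nat.mul_lt_mul_of_lt_of_le (Nat.lt_succ_self m) (le_refl _) this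
  calc (ss.map (fun s => (pvMeasB s + 1).factorial)).sum
      ≤ ss.length * m.factorial := hsum
    _ < (m + 1) * m.factorial := by omega
    _ = (m + 1).factorial := (Nat.factorial_succ m).symm

theorem pvSuccsLen (l : List (Int × Int)) (capacity count : Int) (picks drops : List Nat)
    (path : List Int) :
    (pvSuccs l capacity count picks drops path).length ≤ drops.length + picks.length := by
  simp [pvSuccs]
  split <;> simp

-- literal port of Source B's while loop: pop the top state, emit or push its successors (reversed
-- pushing in Source B = prepending `succ` in head-is-top representation)
def pvLoop (l : List (Int × Int)) (capacity : Int) :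
    List (Int × List Nat × List Nat × List Int) → List (List Int) → List (List Int)
  | [], res => res
  | (count, picks, drops, path) :: rest, res =>
    if path.length = 2 * l.length then pvLoop l capacity rest (res ++ [path])
    else pvLoop l capacity (pvSuccs l capacity count picks drops path ++ rest) res
termination_by stack _ => (stack.map (fun s => (pvMeasB s + 1).factorial)).sum
decreasing_by
  · have : 0 < (pvMeasB (count, picks, drops, path) + 1).factorial := Nat.factorial_pos _
    simp
    omega
  · simp only [List.map_append, List.sum_append, List.map_cons, List.sum_cons]
    have h1 := pvSumFacLt (2 * picks.length + drops.length)
      (pvSuccs l capacity count picks drops path)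
      (fun t ht => pvMeasBSucc ht)
      (le_trans (pvSuccsLen l capacity count picks drops path) (by omega))
    simp [pvMeasB] at h1 ⊢
    omega

def trip2_alt (l : List (Int × Int)) (capacity : Int) : List (List Int) :=
  pvLoop l capacity [(0, List.range l.length, [], [])] []

-- ===== PRECONDITION & SPEC =====
def Spec_trip2 (l : List (Int × Int)) (capacity : Int) (out : List (List Int)) : Prop := out = trip2_alt l capacity
instance (l : List (Int × Int)) (capacity : Int) (out : List (List Int)) : Decidable (Spec_trip2 l capacity out) := by unfold Spec_trip2; infer_instance

-- ===== CLAIM (what is proved, stated in full; the proofs are below) =====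
def Claim_equal_trip2 : Prop := ∀ (l : List (Int × Int)) (capacity : Int), Dom_trip2 l capacity → Spec_trip2 l capacity (trip2 l capacity)

-- ===== LEMMAS AND PROOFS =====

-- recursive reference function on B's states: the list of full paths the DFS emits from one state
def pvBtB (l : List (Int × Int)) (capacity : Int)
    (s : Int × List Nat × List Nat × List Int) : List (List Int) :=
  if s.2.2.2.length = 2 * l.length then [s.2.2.2]
  else ((pvSuccs l capacity s.1 s.2.1 s.2.2.1 s.2.2.2).attach.map
    (fun t => pvBtB l capacity t.1)).flatten
termination_by pvMeasB s
decreasing_by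
  have := pvMeasBSucc t.2
  simp only [pvMeasB] at *
  omega

theorem pvBtBDone {l : List (Int × Int)} {capacity count : Int} {picks drops : List Nat}
    {path : List Int} (h : path.length = 2 * l.length) :
    pvBtB l capacity (count, picks, drops, path) = [path] := by
  rw [pvBtB]; simp [h]

theorem pvBtBStep {l : List (Int × Int)} {capacity count : Int} {picks drops : List Nat}
    {path : List Int} (h : ¬ path.length = 2 * l.length) :
    pvBtB l capacity (count, picks, drops, path)
      = (pvSuccs l capacity count picks drops path).flatMap (pvBtB l capacity) := by
  rw [pvBtB]
  simp [h, List.flatMap_def]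

theorem pvLoopNil (l : List (Int × Int)) (capacity : Int) (res : List (List Int)) :
    pvLoop l capacity [] res = res := by
  rw [pvLoop]

-- the DFS loop pops one state and behaves like appending that state's emitted paths
theorem pvLoopCons (l : List (Int × Int)) (capacity : Int) :
    ∀ (n : Nat) (s : Int × List Nat × List Nat × List Int), pvMeasB s ≤ n →
      ∀ (rest : List (Int × List Nat × List Nat × List Int)) (res : List (List Int)),
        pvLoop l capacity (s :: rest) res = pvLoop l capacity rest (res ++ pvBtB l capacity s) := by
  intro n
  induction n with
  | zero =>
    rintro ⟨c, p, d, path⟩ hs rest res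
    simp only [pvMeasB] at hs
    have hp : p = [] := List.length_eq_zero_iff.1 (by omega)
    have hd : d = [] := List.length_eq_zero_iff.1 (by omega)
    subst hp; subst hd
    by_cases hdone : path.length = 2 * l.length
    · rw [pvLoop]
      simp [hdone, pvBtBDone hdone]
    · rw [pvLoop]
      simp only [if_neg hdone]
      rw [pvBtBStep hdone]
      simp [pvSuccs]
  | succ k ih =>
    rintro ⟨c, p, d, path⟩ hs rest res
    by_cases hdone : path.length = 2 * l.length
    · rw [pvLoop]
      simp [hdone, pvBtBDone hdone]
    · have hall : ∀ t ∈ pvSuccs l capacity c p d path, pvMeasB t ≤ k := by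
        intro t ht
        have h1 := pvMeasBSucc ht
        simp only [pvMeasB] at hs
        omega
      have aux : ∀ (ss : List (Int × List Nat × List Nat × List Int)),
          (∀ t ∈ ss, pvMeasB t ≤ k) → ∀ rest' res',
          pvLoop l capacity (ss ++ rest') res'
            = pvLoop l capacity rest' (res' ++ ss.flatMap (pvBtB l capacity)) := by
        intro ss
        induction ss with
        | nil => intro _ rest' res'; simp
        | cons a tt ihh =>
          intro hmem rest' res'
          rw [List.cons_append, ih a (hmem a (by simp)) (tt ++ rest') res',
            ihh (fun t ht => hmem t (by simp [ht])) rest' (res' ++ pvBtB l capacity a)]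
          simp [List.flatMap_cons]
      rw [pvLoop]
      simp only [if_neg hdone]
      rw [aux _ hall rest res, pvBtBStep hdone]

theorem pvLetIf {α : Type} (x y : List α) (c : Prop) [Decidable c] :
    (let r := x; if c then r ++ y else r) = if c then x ++ y else x := rfl

-- A's conditional-append fold over range = flatMap over the filtered index list
theorem pvFoldlIte {α β : Type} (p : α → Prop) [DecidablePred p] (g : α → List β) :
    ∀ (xs : List α) (acc : List β),
      xs.foldl (fun acc x => if p x then acc ++ g x else acc) acc
        = acc ++ (xs.filter (fun x => decide (p x))).flatMap g := by
  intro xs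
  induction xs with
  | nil => intro acc; simp
  | cons a t ih =>
    intro acc
    by_cases h : p a <;> simp [h, ih, List.flatMap_cons]

-- the list of indices whose flag is 1 (B's representation of A's 0/1 arrays)
def pvIdx (N : Nat) (xs : List Int) : List Nat :=
  (List.range N).filter (fun j => xs.getD j 0 = 1)

theorem pvGetDSetNe (xs : List Int) (i j : Nat) (v : Int) (h : j ≠ i) :
    (xs.set i v).getD j 0 = xs.getD j 0 := by
  simp [List.getD_eq_getElem?_getD, List.getElem?_set_ne (fun hij => h hij.symm)]

theorem pvIdxSetZero (N : Nat) (xs : List Int) (i : Nat) :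
    pvIdx N (xs.set i 0) = (pvIdx N xs).filter (fun j => j ≠ i) := by
  unfold pvIdx
  rw [List.filter_filter]
  apply List.filter_congr
  intro j _
  by_cases hji : j = i
  · subst hji
    by_cases hl : j < xs.length
    · simp [List.getD_eq_getElem?_getD, hl]
    · simp [List.getD_eq_getElem?_getD, hl]
  · have hij : ¬ i = j := fun h => hji h.symm
    simp [List.getD_eq_getElem?_getD, hji, hij]

theorem pvRangeSplit (N i : Nat) (h : i < N) :
    List.range N = List.range i ++ i :: List.range' (i + 1) (N - i - 1) := by
  have h2 : List.range' 0 i 1 ++ List.range' (0 + 1 * i) (N - i) 1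
      = List.range' 0 (i + (N - i)) 1 := List.range'_append
  simp only [Nat.zero_add, Nat.one_mul] at h2
  have h3 : i + (N - i) = N := by omega
  rw [h3] at h2
  rw [List.range_eq_range', ← h2, List.range_eq_range']
  congr 1
  have h4 : N - i = (N - i - 1) + 1 := by omega
  rw [h4, List.range'_succ]
  have h5 : N - i - 1 + 1 - 1 = N - i - 1 := by omega
  rw [h5]

theorem pvIdxSetOne (N : Nat) (xs : List Int) (i : Nat) (hiN : i < N) (hix : i < xs.length) :
    pvIdx N (xs.set i 1)
      = (pvIdx N xs).filter (fun j => j < i) ++ [i] ++ (pvIdx N xs).filter (fun j => i < j) := by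
  have hq : ∀ (j : Nat), j ≠ i → (xs.set i 1).getD j 0 = xs.getD j 0 :=
    fun j hj => pvGetDSetNe xs i j 1 hj
  have hqi : (xs.set i 1).getD i 0 = 1 := by
    simp [List.getD_eq_getElem?_getD, hix]
  have hsplit := pvRangeSplit N i hiN
  unfold pvIdx
  have hlhs : (List.range N).filter (fun j => (xs.set i 1).getD j 0 = 1)
      = (List.range i).filter (fun j => xs.getD j 0 = 1)
        ++ i :: (List.range' (i + 1) (N - i - 1)).filter (fun j => xs.getD j 0 = 1) := by
    rw [hsplit, List.filter_append, List.filter_cons]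
    simp only [hqi, decide_true, if_pos]
    congr 1
    · apply List.filter_congr
      intro j hj
      have hji : j < i := List.mem_range.1 hj
      rw [hq j (by omega)]
    · congr 1
      apply List.filter_congr
      intro j hj
      have hji : i + 1 ≤ j := (List.mem_range'_1.1 hj).1
      rw [hq j (by omega)]
  have hlt : ((List.range N).filter (fun j => xs.getD j 0 = 1)).filter (fun j => j < i)
      = (List.range i).filter (fun j => xs.getD j 0 = 1) := by
    rw [List.filter_filter, hsplit, List.filter_append, List.filter_cons]
    have hnil : (List.range' (i + 1) (N - i - 1)).filter
        (fun a => decide (a < i) && decide (xs.getD a 0 = 1)) = [] := by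
      apply List.filter_eq_nil_iff.2
      intro j hj
      have hji : i + 1 ≤ j := (List.mem_range'_1.1 hj).1
      simp
      omega
    rw [hnil]
    have hii : (decide (i < i) && decide (xs.getD i 0 = 1)) = false := by simp
    rw [hii]
    simp only [Bool.false_eq_true, if_neg, not_false_iff, List.append_nil]
    apply List.filter_congr
    intro j hj
    have hji : j < i := List.mem_range.1 hj
    simp [hji]
  have hgt : ((List.range N).filter (fun j => xs.getD j 0 = 1)).filter (fun j => i < j)
      = (List.range' (i + 1) (N - i - 1)).filter (fun j => xs.getD j 0 = 1) := by
    rw [List.filter_filter, hsplit, List.filter_append, List.filter_cons]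
    have hnil : (List.range i).filter
        (fun a => decide (i < a) && decide (xs.getD a 0 = 1)) = [] := by
      apply List.filter_eq_nil_iff.2
      intro j hj
      have hji : j < i := List.mem_range.1 hj
      simp
      omega
    rw [hnil]
    have hii : (decide (i < i) && decide (xs.getD i 0 = 1)) = false := by simp
    rw [hii]
    simp only [Bool.false_eq_true, if_neg, not_false_iff, List.nil_append]
    apply List.filter_congr
    intro j hj
    have hji : i + 1 ≤ j := (List.mem_range'_1.1 hj).1
    have hij : i < j := by omega
    simp [hij]
  rw [hlhs, hlt, hgt]
  simp

theorem pvIdxReplicateOne (N : Nat) : pvIdx N (List.replicate N 1) = List.range N := by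
  unfold pvIdx
  apply List.filter_eq_self.2
  intro j hj
  have : j < N := List.mem_range.1 hj
  simp [List.getD_eq_getElem?_getD, this]

theorem pvIdxReplicateZero (N : Nat) : pvIdx N (List.replicate N 0) = [] := by
  unfold pvIdx
  apply List.filter_eq_nil_iff.2
  intro j hj
  have : j < N := List.mem_range.1 hj
  simp [List.getD_eq_getElem?_getD, this]

theorem pvFlatMapCongr {α β : Type} {l : List α} {f g : α → List β}
    (h : ∀ a ∈ l, f a = g a) : l.flatMap f = l.flatMap g := by
  induction l with
  | nil => simp
  | cons a t ih =>
    simp only [List.flatMap_cons, h a (by simp), ih (fun a' ha' => h a' (by simp [ha']))]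

theorem pvDropBridge (l : List (Int × Int)) (capacity : Int) (ap ad : List Int)
    (count : Int) (path : List Int) :
    (List.range l.length).foldl (fun acc i =>
      if ad.getD i 0 = 1 then
        acc ++ pvBt l capacity ap (ad.set i 0) (count - 1) (path ++ [(l.getD i (0,0)).2])
      else acc) []
    = (pvIdx l.length ad).flatMap (fun i =>
        pvBt l capacity ap (ad.set i 0) (count - 1) (path ++ [(l.getD i (0,0)).2])) := by
  rw [pvFoldlIte (fun i => ad.getD i 0 = 1)
    (fun i => pvBt l capacity ap (ad.set i 0) (count - 1) (path ++ [(l.getD i (0,0)).2]))]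
  simp [pvIdx]

theorem pvPickBridge (l : List (Int × Int)) (capacity : Int) (ap ad : List Int)
    (count : Int) (path : List Int) :
    (List.range l.length).foldl (fun acc i =>
      if ap.getD i 0 = 1 then
        acc ++ pvBt l capacity (ap.set i 0) (ad.set i 1) (count + 1) (path ++ [(l.getD i (0,0)).1])
      else acc) []
    = (pvIdx l.length ap).flatMap (fun i =>
        pvBt l capacity (ap.set i 0) (ad.set i 1) (count + 1) (path ++ [(l.getD i (0,0)).1])) := by
  rw [pvFoldlIte (fun i => ap.getD i 0 = 1)
    (fun i => pvBt l capacity (ap.set i 0) (ad.set i 1) (count + 1) (path ++ [(l.getD i (0,0)).1]))]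
  simp [pvIdx]

-- main bridge: A's backtracking equals the reference function on B's representation
theorem pvBtEq (l : List (Int × Int)) (capacity : Int) :
    ∀ (n : Nat) (ap ad : List Int) (count : Int) (path : List Int),
      2 * (pvIdx l.length ap).length + (pvIdx l.length ad).length ≤ n →
      ap.length = l.length → ad.length = l.length →
      pvBt l capacity ap ad count path
        = pvBtB l capacity (count, pvIdx l.length ap, pvIdx l.length ad, path) := by
  intro n
  induction n using Nat.strong_induction_on with
  | _ n ih =>
    intro ap ad count path hn hap had
    by_cases hdone : path.length = 2 * l.length
    · rw [pvBt]
      simp [hdone, pvBtBDone hdone]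
    · have hd : ∀ i ∈ pvIdx l.length ad,
          pvBt l capacity ap (ad.set i 0) (count - 1) (path ++ [(l.getD i (0,0)).2])
            = pvBtB l capacity (count - 1, pvIdx l.length ap,
                (pvIdx l.length ad).filter (fun j => j ≠ i), path ++ [(l.getD i (0,0)).2]) := by
        intro i hi
        have hpos : 0 < (pvIdx l.length ad).length := List.length_pos_of_mem hi
        have hflt := pvLenFilterNeLt hi
        rw [ih (n - 1) (by omega) ap (ad.set i 0) (count - 1) (path ++ [(l.getD i (0,0)).2])
          (by rw [pvIdxSetZero]; omega) hap (by simpa using had)]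
        rw [pvIdxSetZero]
      have hp : ∀ i ∈ pvIdx l.length ap,
          pvBt l capacity (ap.set i 0) (ad.set i 1) (count + 1) (path ++ [(l.getD i (0,0)).1])
            = pvBtB l capacity (count + 1, (pvIdx l.length ap).filter (fun j => j ≠ i),
                (pvIdx l.length ad).filter (fun j => j < i) ++ [i]
                  ++ (pvIdx l.length ad).filter (fun j => i < j),
                path ++ [(l.getD i (0,0)).1]) := by
        intro i hi
        have hpos : 0 < (pvIdx l.length ap).length := List.length_pos_of_mem hi
        have hiN : i < l.length := List.mem_range.1 (List.mem_filter.1 hi).1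
        have hflt := pvLenFilterNeLt hi
        have hsp := pvLenSplitLe (pvIdx l.length ad) i
        rw [ih (n - 1) (by omega) (ap.set i 0) (ad.set i 1) (count + 1)
          (path ++ [(l.getD i (0,0)).1])
          (by
            rw [pvIdxSetZero, pvIdxSetOne l.length ad i hiN (by omega)]
            simp only [List.length_append, List.length_cons, List.length_nil]
            omega)
          (by simpa using hap) (by simpa using had)]
        rw [pvIdxSetZero, pvIdxSetOne l.length ad i hiN (by omega)]
      rw [pvBt]
      simp only [if_neg hdone]
      rw [pvLetIf]
      rw [pvBtBStep hdone]
      by_cases hc : count < capacity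
      · simp only [if_pos hc, pvDropBridge, pvPickBridge]
        simp only [pvSuccs, if_pos hc, List.flatMap_append, List.flatMap_map]
        rw [pvFlatMapCongr hd, pvFlatMapCongr hp]
      · simp only [if_neg hc, pvDropBridge]
        simp only [pvSuccs, if_neg hc, List.flatMap_append, List.flatMap_map]
        rw [pvFlatMapCongr hd]
        simp

-- ===== VERDICT (by name: the statement is the Claim_ definition above) =====
theorem trip2_spec : Claim_equal_trip2 := by
  intro l capacity _
  show trip2 l capacity = trip2_alt l capacity
  unfold trip2 trip2_alt
  rw [pvLoopCons l capacity (pvMeasB (0, List.range l.length, [], [])) _ (le_refl _) [] [],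
    pvLoopNil]
  rw [pvBtEq l capacity (2 * l.length) _ _ 0 []
    (by simp [pvIdxReplicateOne, pvIdxReplicateZero]) (by simp) (by simp)]
  rw [pvIdxReplicateOne, pvIdxReplicateZero]
  simp
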